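-- pv_equiv track=rewrite | github.com/chenzqNJU/Python_learning | study2/zyx.py | f
-- ===== SOURCE A (Python) =====
-- def f(n):
--     L = list(range(n, 0, -1))
--     output = []
--     while (L):
--         a = L.pop()
--         if L:
--             b = L.pop()
--             L.insert(0, b)
--
--         output += [a]
--     return output
-- ===== SOURCE B (Python) =====
-- def split2(q):
--     # one pass over q taking the cards pairwise: dealt card, moved-to-bottom card
--     taken, rest = [], []
--     i = 0
--     while i + 1 < len(q):
--         taken.append(q[i])
--         rest.append(q[i + 1])
--         i += 2
--     if i < len(q):
--         taken.append(q[i])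
--     return taken, rest
--
-- def f(n):
--     # sweep-and-recurse dealing: emit every other card of the queue in one sweep,
--     # the skipped cards form the next queue (rotated by one after an odd-length sweep)
--     q = list(range(n, 0, -1))[::-1]
--     out = []
--     while q:
--         taken, rest = split2(q)
--         if len(q) % 2 == 1 and rest:
--             rest = rest[1:] + rest[:1]
--         out += taken
--         q = rest
--     return out
-- ===== Notes on version B (the rewrite author's own statement) =====
-- stated objective: faster
-- what changed: Replaces the one-card-at-a-time queue simulation (pop from end, insert at front, O(n) per step) with whole-sweep processing: each pass emits every other card and keeps the skipped half as the next queue, rotated by one after an odd-length sweep.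
import Mathlib
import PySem

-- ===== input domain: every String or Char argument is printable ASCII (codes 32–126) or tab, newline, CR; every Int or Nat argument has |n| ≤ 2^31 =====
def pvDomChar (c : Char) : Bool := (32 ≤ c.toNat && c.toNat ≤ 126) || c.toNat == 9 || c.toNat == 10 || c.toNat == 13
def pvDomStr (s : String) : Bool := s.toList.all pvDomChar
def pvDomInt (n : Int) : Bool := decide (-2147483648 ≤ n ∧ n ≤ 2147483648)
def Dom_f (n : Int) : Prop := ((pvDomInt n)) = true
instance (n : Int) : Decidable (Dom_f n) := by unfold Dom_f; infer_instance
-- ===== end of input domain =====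

-- B replaces A's one-card-at-a-time queue simulation by sweep-at-a-time processing (faster).

-- ===== PORT A =====
-- while L: a = L.pop(); if L: b = L.pop(); L.insert(0, b); output += [a]
def fLoop (L output : List Int) : List Int :=
  if h : L = [] then output
  else
    let a := L.getLast h                         -- a = L.pop()
    let L1 := L.dropLast
    let L2 := if h1 : L1 = [] then L1
              else L1.getLast h1 :: L1.dropLast  -- b = L.pop(); L.insert(0, b)
    fLoop L2 (output ++ [a])
termination_by L.length
decreasing_by
  have hL : L ≠ [] := by assumption
  have h1 : 0 < L.length := List.length_pos_iff.mpr hL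
  have hd : L.dropLast.length = L.length - 1 := List.length_dropLast
  split
  · omega
  · rename_i h2
    have h3 : 0 < L.dropLast.length := List.length_pos_iff.mpr h2
    have hd2 : L.dropLast.dropLast.length = L.dropLast.length - 1 := List.length_dropLast
    simp only [List.length_cons]
    omega

def f (n : Int) : List Int := fLoop (PySem.List.pyRange n 0 (-1)) []

-- ===== PORT B =====
-- split2(q): pairwise pass collecting (taken, rest) = (q[0],q[2],…), (q[1],q[3],…)
def split2 : List Int → List Int × List Int
  | [] => ([], [])
  | [x] => ([x], [])
  | x :: y :: q => let p := split2 q; (x :: p.1, y :: p.2)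

-- termination helper for dealLoop (cited by decreasing_by)
theorem split2_snd_length_lt (q : List Int) (h : q ≠ []) : (split2 q).2.length < q.length := by
  induction q using split2.induct with
  | case1 => exact absurd rfl h
  | case2 x => simp [split2]
  | case3 x y q ih =>
    simp only [split2, List.length_cons]
    by_cases hq : q = []
    · subst hq; simp [split2]
    · have := ih hq; omega

-- while q: taken, rest = split2(q); if odd and rest: rotate rest; out += taken; q = rest
def dealLoop (q out : List Int) : List Int :=
  if hq : q = [] then out
  else
    let p := split2 q
    let rest := if q.length % 2 == 1 && !p.2.isEmpty
                then p.2.tail ++ p.2.take 1       -- rest[1:] + rest[:1]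
                else p.2
    dealLoop rest (out ++ p.1)
termination_by q.length
decreasing_by
  have hlt := split2_snd_length_lt q hq
  split
  · simp only [List.length_append, List.length_tail, List.length_take]
    omega
  · exact hlt

-- list(range(n, 0, -1))[::-1]; [::-1] is exactly reverse (PySem.List.slice?_none_none_neg_one)
def f_alt (n : Int) : List Int := dealLoop ((PySem.List.pyRange n 0 (-1)).reverse) []

-- ===== PRECONDITION & SPEC =====
def Spec_f (n : Int) (out : List Int) : Prop := out = f_alt n
instance (n : Int) (out : List Int) : Decidable (Spec_f n out) := by unfold Spec_f; infer_instance

-- ===== CLAIM (what is proved, stated in full; the proofs are below) =====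
def Claim_equal_f : Prop := ∀ (n : Int), Dom_f n → Spec_f n (f n)

-- ===== LEMMAS AND PROOFS =====

-- the dealing process in queue terms: front of the list is the front of the queue
def g : List Int → List Int
  | [] => []
  | [a] => [a]
  | a :: b :: q => a :: g (q ++ [b])
termination_by q => q.length
decreasing_by simp

-- rotate-then-deal: g after the odd-sweep rotation rest[1:] + rest[:1]
def grot (x : List Int) : List Int := g (x.tail ++ x.take 1)

-- one A-iteration on a deck with at least two cards
theorem fLoop_step (M : List Int) (b a : Int) (out : List Int) :
    fLoop ((M ++ [b]) ++ [a]) out = fLoop (b :: M) (out ++ [a]) := by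
  rw [fLoop]
  rw [dif_neg (by simp)]
  simp only [List.dropLast_concat, List.getLast_concat]
  rw [dif_neg (by simp)]

-- A's loop is g on the reversed deck (the end of L is the front of the queue)
theorem fLoop_eq_g (L output : List Int) : fLoop L output = output ++ g L.reverse := by
  rcases List.eq_nil_or_concat' L with rfl | ⟨L1, a, rfl⟩
  · simp [fLoop, g]
  · rcases List.eq_nil_or_concat' L1 with rfl | ⟨M, b, rfl⟩
    · rw [fLoop]
      rw [dif_neg (by simp)]
      simp [fLoop, g]
    · rw [fLoop_step, fLoop_eq_g (b :: M) (output ++ [a])]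
      simp [g, List.reverse_append]
termination_by L.length
decreasing_by
  subst_vars
  simp only [List.append_assoc, List.length_append, List.length_cons, List.length_nil]
  omega

-- sweep invariant: one whole sweep of g over Q ++ R
theorem g_sweep (Q R : List Int) :
    g (Q ++ R) = (split2 Q).1 ++
      (if Q.length % 2 = 1 then grot (R ++ (split2 Q).2) else g (R ++ (split2 Q).2)) := by
  induction Q using split2.induct generalizing R with
  | case1 => simp [split2]
  | case2 x =>
    cases R with
    | nil => simp [split2, g, grot]
    | cons h t => simp [split2, g, grot]
  | case3 x y q ih =>
    have hpar : (x :: y :: q).length % 2 = q.length % 2 := by simp; omega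
    show g (x :: y :: (q ++ R)) = _
    rw [g, show (q ++ R) ++ [y] = q ++ (R ++ [y]) by simp, ih (R ++ [y])]
    simp only [split2, hpar, List.append_assoc, List.singleton_append]
    split <;> simp

-- g restated sweep-at-a-time: one full sweep of g is split2 + rotation
theorem g_eq_sweep (q : List Int) :
    g q = (split2 q).1 ++
      g (if q.length % 2 == 1 && !(split2 q).2.isEmpty
         then (split2 q).2.tail ++ (split2 q).2.take 1 else (split2 q).2) := by
  have h := g_sweep q []
  simp only [List.append_nil, List.nil_append] at h
  rw [h]
  by_cases hodd : q.length % 2 = 1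
  · by_cases hnil : (split2 q).2 = []
    · simp [hodd, hnil, grot, g]
    · simp [hodd, hnil, grot]
  · simp [hodd]

-- B's loop is g
theorem dealLoop_eq_g (q out : List Int) : dealLoop q out = out ++ g q := by
  rw [dealLoop]
  split
  · rename_i h; subst h; simp [g]
  · rename_i h
    rw [dealLoop_eq_g]
    rw [List.append_assoc]
    congr 1
    exact (g_eq_sweep q).symm
termination_by q.length
decreasing_by
  have hlt := split2_snd_length_lt q (by assumption)
  split
  · simp only [List.length_append, List.length_tail, List.length_take]
    omega
  · exact hlt

-- ===== VERDICT (by name: the statement is the Claim_ definition above) =====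
theorem f_spec : Claim_equal_f := by
  intro n _
  unfold Spec_f f f_alt
  rw [fLoop_eq_g, dealLoop_eq_g]
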